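-- pv_equiv track=rewrite | github.com/RockyRoad29/PyXRef | quickxref.py | path_steps
-- ===== SOURCE A (Python) =====
-- def path_steps(module_name):
--     """
--     >>> path_steps('app.talks.models')
--     ['app.talks.models', 'app.talks', 'app']
--     """
--     steps = module_name.split(".")
--     locations = []
--     q = module_name
--     steps.reverse()
--     for step in steps:
--         locations.append(q)
--         # remove last step from package path
--         n = len(step) + 1
--         q = q[:-n]
--     return locations
-- ===== SOURCE B (Python) =====
-- def path_steps(module_name):
--     parts = module_name.split(".")
--     return [".".join(parts[:i]) for i in range(len(parts), 0, -1)]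
-- ===== Notes on version B (the rewrite author's own statement) =====
-- stated objective: simpler
-- what changed: Replaces the running accumulator string that is trimmed character-count by character-count each iteration with a stateless comprehension that rejoins decreasing prefixes of the split parts.
import Mathlib
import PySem

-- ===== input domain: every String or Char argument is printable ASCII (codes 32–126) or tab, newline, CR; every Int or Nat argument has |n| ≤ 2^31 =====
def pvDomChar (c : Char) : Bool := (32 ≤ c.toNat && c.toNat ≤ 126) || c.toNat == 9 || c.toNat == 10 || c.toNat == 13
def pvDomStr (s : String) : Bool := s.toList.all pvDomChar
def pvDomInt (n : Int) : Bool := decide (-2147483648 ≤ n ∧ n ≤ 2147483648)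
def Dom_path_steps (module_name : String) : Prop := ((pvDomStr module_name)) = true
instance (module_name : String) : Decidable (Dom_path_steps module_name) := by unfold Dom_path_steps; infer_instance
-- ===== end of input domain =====

-- B replaces A's running accumulator string (trimmed by len(step)+1 each iteration) with a
-- stateless comprehension rejoining decreasing prefixes of the split parts (objective: simpler).

-- ===== PORT A =====
def path_steps (module_name : String) : List String :=
  -- steps = module_name.split(".")  ("." is non-empty, so split? is always `some`)
  let steps : List String := (PySem.Str.split? module_name ".").getD []
  -- locations = []; q = module_name; steps.reverse(); for step in steps: append q; q = q[:-n]
  let res := steps.reverse.foldl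
    (fun (st : List String × String) step =>
      (st.1 ++ [st.2],
       PySem.Str.slice st.2 none (some (-(PySem.Str.len step + 1)))))
    (([] : List String), module_name)
  res.1

-- ===== PORT B =====
def path_steps_alt (module_name : String) : List String :=
  -- parts = module_name.split(".")
  let parts : List String := (PySem.Str.split? module_name ".").getD []
  -- ['.'.join(parts[:i]) for i in range(len(parts), 0, -1)]
  (PySem.List.pyRange (parts.length : Int) 0 (-1)).map
    (fun i => PySem.Str.join "." (PySem.List.slice parts none (some i)))

-- ===== PRECONDITION & SPEC =====
def Spec_path_steps (module_name : String) (out : List String) : Prop := out = path_steps_alt module_name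
instance (module_name : String) (out : List String) : Decidable (Spec_path_steps module_name out) := by unfold Spec_path_steps; infer_instance

-- ===== CLAIM (what is proved, stated in full; the proofs are below) =====
def Claim_equal_path_steps : Prop := ∀ (module_name : String), Dom_path_steps module_name → Spec_path_steps module_name (path_steps module_name)

-- ===== LEMMAS AND PROOFS =====

-- PySem's fueled splitOn with a single-character separator is Mathlib's List.splitOn.
theorem pv_go_single (c : Char) : ∀ (fuel : Nat) (l cur : List Char) (acc : List (List Char)),
    l.length < fuel → c ∉ cur →
    PySem.Chars.splitOn.go [c] fuel l cur acc = acc.reverse ++ (cur.reverse ++ l).splitOn c := by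
  intro fuel
  induction fuel with
  | zero => intro l cur acc h _; exact absurd h (by omega)
  | succ fuel ih =>
    intro l cur acc hlen hcur
    cases l with
    | nil =>
      have hx : ∀ x ∈ cur.reverse, ¬ (x == c) = true := by
        intro x hx hxc
        rw [show x = c by simpa using hxc] at hx
        exact hcur (List.mem_reverse.mp hx)
      simp [PySem.Chars.splitOn.go, List.splitOn, List.splitOnP_eq_single _ _ hx]
    | cons d rest =>
      by_cases hdc : d = c
      · subst hdc
        rw [show PySem.Chars.splitOn.go [d] (fuel+1) (d :: rest) cur acc
              = PySem.Chars.splitOn.go [d] fuel rest [] (cur.reverse :: acc) by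
            simp [PySem.Chars.splitOn.go, List.isPrefixOf]]
        rw [ih rest [] (cur.reverse :: acc) (by simpa using hlen) (by simp)]
        have hx : ∀ x ∈ cur.reverse, ¬ (x == d) = true := by
          intro x hx hxc
          rw [show x = d by simpa using hxc] at hx
          exact hcur (List.mem_reverse.mp hx)
        simp only [List.splitOn]
        rw [List.splitOnP_append_cons (fun x => x == d) cur.reverse rest d (by simp)]
        rw [List.splitOnP_eq_single (fun x => x == d) cur.reverse hx]
        simp
      · rw [show PySem.Chars.splitOn.go [c] (fuel+1) (d :: rest) cur acc
              = PySem.Chars.splitOn.go [c] fuel rest (d :: cur) acc by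
            have hcd : ¬ c = d := fun h => hdc h.symm
            simp [PySem.Chars.splitOn.go, List.isPrefixOf, hcd]]
        rw [ih rest (d :: cur) acc (by simpa using hlen) (by
          intro h; rcases List.mem_cons.mp h with h | h
          · exact hdc h.symm
          · exact hcur h)]
        simp

theorem pv_splitOn_chars (s : List Char) :
    PySem.Chars.splitOn s ['.'] = s.splitOn '.' := by
  rw [PySem.Chars.splitOn, pv_go_single '.' (s.length + 1) s [] [] (by omega) (by simp)]
  simp

-- PySem.Chars.join is List.intercalate.
theorem pv_join_eq (sep : List Char) : ∀ ps : List (List Char),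
    PySem.Chars.join sep ps = sep.intercalate ps := by
  intro ps
  induction ps with
  | nil => simp [PySem.Chars.join_nil, List.intercalate]
  | cons p ps ih =>
    cases ps with
    | nil => simp [PySem.Chars.join_singleton, List.intercalate]
    | cons q rest =>
      rw [PySem.Chars.join_cons_cons, ih]
      simp [List.intercalate, List.intersperse]

-- joining a snoc appends "." and the last part
theorem pv_join_snoc (p : List Char) : ∀ qs : List (List Char), qs ≠ [] →
    PySem.Chars.join ['.'] (qs ++ [p]) = PySem.Chars.join ['.'] qs ++ '.' :: p := by
  intro qs
  induction qs with
  | nil => intro h; exact absurd rfl h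
  | cons q qs ih =>
    intro _
    cases qs with
    | nil => simp [PySem.Chars.join_cons_cons, PySem.Chars.join_singleton]
    | cons q' rest =>
      simp only [List.cons_append] at ih ⊢
      rw [PySem.Chars.join_cons_cons, PySem.Chars.join_cons_cons, ih (by simp)]
      simp

-- the decreasing prefix-joins B produces, at the char level
def pvRpj (ps : List (List Char)) : List (List Char) :=
  (List.range ps.length).map (fun k => PySem.Chars.join ['.'] (ps.take (ps.length - k)))

theorem pv_rpj_snoc (ps : List (List Char)) (p : List Char) :
    pvRpj (ps ++ [p]) = PySem.Chars.join ['.'] (ps ++ [p]) :: pvRpj ps := by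
  unfold pvRpj
  rw [List.length_append, List.length_singleton, List.range_succ_eq_map]
  rw [List.map_cons, List.map_map]
  congr 1
  · rw [Nat.sub_zero, List.take_of_length_le (by simp)]
  · apply List.map_congr_left
    intro k hk
    have hk' : k < ps.length := List.mem_range.mp hk
    simp only [Function.comp]
    rw [show ps.length + 1 - (k + 1) = ps.length - k by omega,
      List.take_append_of_le_length (by omega)]

-- A's trimming loop, at the char level
def pvF (st : List (List Char) × List Char) (step : List Char) : List (List Char) × List Char :=
  (st.1 ++ [st.2], st.2.take (st.2.length - (step.length + 1)))

theorem pv_loop (ps : List (List Char)) : ∀ acc : List (List Char), ps ≠ [] →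
    ((ps.reverse).foldl pvF (acc, PySem.Chars.join ['.'] ps)).1 = acc ++ pvRpj ps := by
  induction ps using List.reverseRecOn with
  | nil => intro acc h; exact absurd rfl h
  | append_singleton qs p ih =>
    intro acc _
    rw [List.reverse_append, List.reverse_singleton, List.singleton_append, List.foldl_cons]
    cases hqs : qs with
    | nil =>
      simp [pvF, pvRpj, PySem.Chars.join_singleton]
    | cons q rest =>
      rw [← hqs]
      have hne : qs ≠ [] := by simp [hqs]
      have hJ := pv_join_snoc p qs hne
      have hq' : pvF (acc, PySem.Chars.join ['.'] (qs ++ [p])) p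
          = (acc ++ [PySem.Chars.join ['.'] (qs ++ [p])], PySem.Chars.join ['.'] qs) := by
        unfold pvF
        refine Prod.ext rfl ?_
        simp only [hJ]
        rw [show (PySem.Chars.join ['.'] qs ++ '.' :: p).length - (p.length + 1)
              = (PySem.Chars.join ['.'] qs).length by
            simp only [List.length_append, List.length_cons]; omega]
        rw [List.take_append_of_le_length (le_refl _), List.take_length]
      rw [hq', ih (acc ++ [PySem.Chars.join ['.'] (qs ++ [p])]) hne, pv_rpj_snoc]
      simp

-- bridge: port A's String-level fold maps (via toList) onto the char-level loop pvF
theorem pv_fold_map (steps : List String) : ∀ (acc : List String) (q : String),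
    ((steps.foldl (fun (st : List String × String) step =>
        (st.1 ++ [st.2], PySem.Str.slice st.2 none (some (-(PySem.Str.len step + 1)))))
      (acc, q)).1).map String.toList
    = ((steps.map String.toList).foldl pvF (acc.map String.toList, q.toList)).1 := by
  induction steps with
  | nil => intro acc q; simp
  | cons s ss ih =>
    intro acc q
    rw [List.foldl_cons, List.map_cons, List.foldl_cons]
    have h2 : (PySem.Str.slice q none (some (-(PySem.Str.len s + 1)))).toList
        = q.toList.take (q.toList.length - (s.toList.length + 1)) := by
      rw [PySem.Str.toList_slice, PySem.Chars.slice_eq_listSlice, PySem.Str.len_eq]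
      rw [show -((s.toList.length : Int) + 1) = -(((s.toList.length + 1 : Nat) : Int)) by
        push_cast; ring]
      exact PySem.List.slice_to_neg_natCast q.toList (s.toList.length + 1) (by omega)
    have h1 : pvF (acc.map String.toList, q.toList) s.toList
        = ((acc ++ [q]).map String.toList,
           (PySem.Str.slice q none (some (-(PySem.Str.len s + 1)))).toList) := by
      unfold pvF
      exact Prod.ext (by simp) h2.symm
    rw [ih (acc ++ [q]) (PySem.Str.slice q none (some (-(PySem.Str.len s + 1)))), h1]

-- ===== VERDICT (by name: the statement is the Claim_ definition above) =====
theorem path_steps_spec : Claim_equal_path_steps := by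
  intro s _
  unfold Spec_path_steps path_steps path_steps_alt
  -- the split: Str.split? s "." is `some parts` with parts.map toList = s.toList.splitOn '.'
  have hsplit := PySem.Str.split?_map s "."
  rw [show (".".toList) = ['.'] from rfl] at hsplit
  rw [show PySem.Chars.split? s.toList ['.'] = some (s.toList.splitOn '.') by
    simp [PySem.Chars.split?, pv_splitOn_chars]] at hsplit
  cases hp : PySem.Str.split? s "." with
  | none => rw [hp] at hsplit; simp at hsplit
  | some parts =>
    rw [hp] at hsplit
    simp only [Option.map_some, Option.some.injEq] at hsplit
    simp only [Option.getD_some]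
    set ps : List (List Char) := s.toList.splitOn '.' with hps
    have hmap : parts.map String.toList = ps := hsplit
    have hne : ps ≠ [] := by
      rw [hps]; exact List.splitOnP_ne_nil _ _
    have hpartsne : parts ≠ [] := by
      intro h; rw [h] at hmap; exact hne hmap.symm
    have hJ : PySem.Chars.join ['.'] ps = s.toList := by
      rw [pv_join_eq, hps, List.intercalate_splitOn]
    -- compare the two lists after mapping toList (toList is injective)
    apply List.map_injective_iff.mpr (fun a b h => String.toList_inj.mp h)
    -- A side
    rw [pv_fold_map parts.reverse [] s]
    rw [List.map_reverse, hmap, List.map_nil, ← hJ, pv_loop ps [] hne, List.nil_append]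
    -- B side
    rw [List.map_map, PySem.List.pyRange_neg_one, List.map_map]
    unfold pvRpj
    rw [show ((parts.length : Int) - 0).toNat = ps.length by
      rw [← hmap]; simp]
    apply List.map_congr_left
    intro k hk
    have hk' : k < ps.length := List.mem_range.mp hk
    have hlen : parts.length = ps.length := by rw [← hmap]; simp
    simp only [Function.comp]
    rw [PySem.Str.toList_join, show (".".toList) = ['.'] from rfl]
    congr 1
    rw [PySem.List.slice_to parts (by omega), List.map_take, hmap]
    congr 1
    omega
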